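-- pv_equiv track=rewrite | github.com/RosettaMLBootCamp2025/hw3-python-refresher-petridecus | sequence_utils.py | count_charged_residues
-- ===== SOURCE A (Python) =====
-- def count_charged_residues(protein_seq):
--     """
--     Count positively and negatively charged amino acids.
--
--     Positively charged: K, R, H
--     Negatively charged: D, E
--
--     Args:
--         protein_seq (str): Protein sequence
--
--     Returns:
--         tuple: (positive_count, negative_count)
--
--     Example:
--         >>> count_charged_residues("KRHDE")
--         (3, 2)
--     """
--     positive = set('KRH')
--     negative = set('DE')
--
--     pos_neg_counts = (0, 0)
--
--     for aa in protein_seq: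
--         if aa in positive:
--             pos_neg_counts = (pos_neg_counts[0] + 1, pos_neg_counts[1])
--         elif aa in negative:
--             pos_neg_counts = (pos_neg_counts[0], pos_neg_counts[1] + 1)
--
--     return pos_neg_counts
-- ===== SOURCE B (Python) =====
-- def count_charged_residues(protein_seq):
--     """Tabulate-then-sum: build a frequency table in one pass, then add up
--     the counts of the fixed charged keys (idiomatic, no per-char branching)."""
--     counts = {}
--     for aa in protein_seq:
--         counts[aa] = counts.get(aa, 0) + 1
--     positive = counts.get('K', 0) + counts.get('R', 0) + counts.get('H', 0)
--     negative = counts.get('D', 0) + counts.get('E', 0)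
--     return (positive, negative)
-- ===== Notes on version B (the rewrite author's own statement) =====
-- stated objective: idiomatic
-- what changed: A branches per character with elif over two membership sets while updating a tuple; B builds a full character-frequency table in one pass and then sums the counts of the five fixed charged keys.
import Mathlib
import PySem

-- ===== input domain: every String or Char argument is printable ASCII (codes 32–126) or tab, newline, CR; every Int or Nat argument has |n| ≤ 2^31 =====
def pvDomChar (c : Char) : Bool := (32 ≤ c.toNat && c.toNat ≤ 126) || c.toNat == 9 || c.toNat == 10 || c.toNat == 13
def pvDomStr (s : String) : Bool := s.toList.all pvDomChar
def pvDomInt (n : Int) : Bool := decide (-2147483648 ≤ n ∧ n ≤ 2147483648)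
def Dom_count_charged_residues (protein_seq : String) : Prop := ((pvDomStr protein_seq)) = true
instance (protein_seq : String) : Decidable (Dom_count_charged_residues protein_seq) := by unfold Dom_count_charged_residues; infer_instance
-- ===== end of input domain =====

-- B replaces A's per-character elif branching with a one-pass frequency table summed over the five charged keys (idiomatic).

-- ===== PORT A =====
def count_charged_residues (protein_seq : String) : Int × Int :=
  let positive : List Char := PySem.Set.ofList "KRH".toList
  let negative : List Char := PySem.Set.ofList "DE".toList
  protein_seq.toList.foldl (fun pn aa =>
    if positive.contains aa then (pn.1 + 1, pn.2)
    else if negative.contains aa then (pn.1, pn.2 + 1)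
    else pn) (0, 0)

-- ===== PORT B =====
def count_charged_residues_alt (protein_seq : String) : Int × Int :=
  let counts : PySem.Dict Char Int :=
    protein_seq.toList.foldl (fun d aa => d.insert aa (d.getD aa 0 + 1)) PySem.Dict.empty
  (counts.getD 'K' 0 + counts.getD 'R' 0 + counts.getD 'H' 0,
   counts.getD 'D' 0 + counts.getD 'E' 0)

-- ===== PRECONDITION & SPEC =====
def Spec_count_charged_residues (protein_seq : String) (out : Int × Int) : Prop := out = count_charged_residues_alt protein_seq
instance (protein_seq : String) (out : Int × Int) : Decidable (Spec_count_charged_residues protein_seq out) := by unfold Spec_count_charged_residues; infer_instance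

-- ===== CLAIM (what is proved, stated in full; the proofs are below) =====
def Claim_equal_count_charged_residues : Prop := ∀ (protein_seq : String), Dom_count_charged_residues protein_seq → Spec_count_charged_residues protein_seq (count_charged_residues protein_seq)

-- ===== LEMMAS AND PROOFS =====

lemma countA_loop (l : List Char) (p n : Int) :
    l.foldl (fun pn aa =>
      if (PySem.Set.ofList "KRH".toList : List Char).contains aa then (pn.1 + 1, pn.2)
      else if (PySem.Set.ofList "DE".toList : List Char).contains aa then (pn.1, pn.2 + 1)
      else pn) (p, n)
    = (p + l.count 'K' + l.count 'R' + l.count 'H',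
       n + l.count 'D' + l.count 'E') := by
  induction l generalizing p n with
  | nil => simp
  | cons c t ih =>
    have hpos : (PySem.Set.ofList "KRH".toList : List Char).contains c = (decide (c = 'K') || (decide (c = 'R') || decide (c = 'H'))) := by
      have h : (PySem.Set.ofList "KRH".toList : List Char) = ['K', 'R', 'H'] := by decide
      simp [h]
    have hneg : (PySem.Set.ofList "DE".toList : List Char).contains c = (decide (c = 'D') || decide (c = 'E')) := by
      have h : (PySem.Set.ofList "DE".toList : List Char) = ['D', 'E'] := by decide
      simp [h]
    rw [List.foldl_cons]
    by_cases hK : c = 'K'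
    · simp only [hpos, hneg, hK, if_pos, if_neg, List.count_cons]
      rw [ih]
      subst hK; simp [List.count_cons]; push_cast; omega
    · by_cases hR : c = 'R'
      · simp only [hpos, hneg, hR]
        rw [if_pos (by simp), ih]
        subst hR; simp [List.count_cons, hK]; push_cast; omega
      · by_cases hH : c = 'H'
        · simp only [hpos, hneg, hH]
          rw [if_pos (by simp), ih]
          subst hH; simp [List.count_cons, hK, hR]; push_cast; omega
        · by_cases hD : c = 'D'
          · simp only [hpos, hneg, hD]
            rw [if_neg (by simp [hK, hR, hH, hD]), if_pos (by simp), ih]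
            subst hD; simp [List.count_cons, hK, hR, hH]; push_cast; omega
          · by_cases hE : c = 'E'
            · simp only [hpos, hneg, hE]
              rw [if_neg (by simp [hK, hR, hH]), if_pos (by simp), ih]
              subst hE; simp [List.count_cons, hK, hR, hH, hD]; push_cast; omega
            · rw [if_neg (by simp [hpos, hK, hR, hH]), if_neg (by simp [hneg, hD, hE]), ih]
              simp [List.count_cons, hK, hR, hH, hD, hE]

lemma countB_eval (s : String) :
    count_charged_residues_alt s
    = ((s.toList.count 'K' : Int) + s.toList.count 'R' + s.toList.count 'H',
       (s.toList.count 'D' : Int) + s.toList.count 'E') := by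
  unfold count_charged_residues_alt
  simp [PySem.Dict.getD_foldl_insert_add_one]

-- ===== VERDICT (by name: the statement is the Claim_ definition above) =====
theorem count_charged_residues_spec : Claim_equal_count_charged_residues := by
  intro s _
  unfold Spec_count_charged_residues
  rw [countB_eval]
  exact (countA_loop s.toList 0 0).trans (by simp)
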